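-- pv_equiv track=rewrite | github.com/livosr/EDAW | datasets/NER_data/ontonotes-c/chm.py | count_entities
-- ===== SOURCE A (Python) =====
-- def count_entities(data):
--     entity_count = {}
--     current_entity = None
--
--     for line in data.split('\n'):
--         line = line.strip()
--         if line:
--             word, tag = line.split()
--             if tag.startswith('B-'):
--                 if current_entity:
--                     entity_count[current_entity] = entity_count.get(current_entity, 0) + 1
--                 current_entity = tag[2:]
--             elif tag.startswith('I-'):
--                 continue
--             else:
--                 if current_entity:
--                     entity_count[current_entity] = entity_count.get(current_entity, 0) + 1
--                 current_entity = None
--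
--     if current_entity:
--         entity_count[current_entity] = entity_count.get(current_entity, 0) + 1
--
--     return entity_count
-- ===== SOURCE B (Python) =====
-- def count_entities(data):
--     entity_count = {}
--     for line in data.split('\n'):
--         line = line.strip()
--         if line:
--             word, tag = line.split()
--             if tag.startswith('B-') and tag[2:]:
--                 entity_count[tag[2:]] = entity_count.get(tag[2:], 0) + 1
--     return entity_count
-- ===== Notes on version B (the rewrite author's own statement) =====
-- stated objective: simpler
-- what changed: B drops A's current_entity state machine and post-loop flush entirely: since every opened entity is eventually counted exactly once, B counts each entity-opening tag with a nonempty type directly in one stateless pass over the lines.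
import Mathlib
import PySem

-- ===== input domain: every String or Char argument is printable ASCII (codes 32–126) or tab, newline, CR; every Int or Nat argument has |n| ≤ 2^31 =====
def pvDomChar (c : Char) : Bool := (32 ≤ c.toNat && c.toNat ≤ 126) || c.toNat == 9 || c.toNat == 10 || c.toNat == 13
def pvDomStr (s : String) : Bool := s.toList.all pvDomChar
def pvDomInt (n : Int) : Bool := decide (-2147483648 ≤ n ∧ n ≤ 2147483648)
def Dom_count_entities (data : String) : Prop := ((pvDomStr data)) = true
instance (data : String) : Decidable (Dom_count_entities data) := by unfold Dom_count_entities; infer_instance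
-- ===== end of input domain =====

-- B removes A's current_entity state machine and post-loop flush: each entity-opening tag with a
-- nonempty type is counted directly, one stateless pass (objective: simpler).

-- ===== PORT A =====
-- A's repeated `if current_entity: entity_count[current_entity] = entity_count.get(current_entity, 0) + 1`
-- (the close-and-count step) as a helper; `none`/`some ""` are falsy.
def pvFlushA (st : PySem.Dict String Int × Option String) : PySem.Dict String Int :=
  match st with
  | (d, some s) => if s ≠ "" then d.insert s (d.getD s 0 + 1) else d
  | (d, none) => d

-- one iteration of A's `for line in data.split('\n')` loop
def pvStepA (st : PySem.Dict String Int × Option String) (rawline : String) :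
    PySem.Dict String Int × Option String :=
  let line := PySem.Str.strip rawline
  if line ≠ "" then
    match PySem.Str.split₀ line with
    | [_, tag] =>
      if PySem.Str.startswith tag "B-" then
        (pvFlushA st, some (PySem.Str.slice tag (some 2) none))
      else if PySem.Str.startswith tag "I-" then st
      else (pvFlushA st, none)
    | _ => st  -- Python raises ValueError here (unpacking ≠ 2 tokens); excluded by Pre_
  else st

def count_entities (data : String) : List (String × Int) :=
  -- data.split('\n'): split? is `some` since the separator "\n" ≠ "", so getD [] is exact
  (pvFlushA (((PySem.Str.split? data "\n").getD []).foldl pvStepA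
      (PySem.Dict.empty, none))).items

-- ===== PORT B =====
-- one iteration of B's loop: count an entity-opening tag with a nonempty type, ignore the rest
def pvStepB (d : PySem.Dict String Int) (rawline : String) : PySem.Dict String Int :=
  let line := PySem.Str.strip rawline
  if line ≠ "" then
    match PySem.Str.split₀ line with
    | [_, tag] =>
      if PySem.Str.startswith tag "B-" then
        let etype := PySem.Str.slice tag (some 2) none
        if etype ≠ "" then d.insert etype (d.getD etype 0 + 1) else d
      else d
    | _ => d  -- Python raises ValueError here (unpacking ≠ 2 tokens); excluded by Pre_
  else d

def count_entities_alt (data : String) : List (String × Int) :=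
  ((((PySem.Str.split? data "\n").getD []).foldl pvStepB PySem.Dict.empty)).items

-- ===== PRECONDITION & SPEC =====
-- Pre_ excludes exactly the inputs where A raises ValueError: a line whose stripped form is
-- non-empty but does not split into exactly two whitespace-separated tokens.
def Pre_count_entities (data : String) : Prop :=
  ∀ l ∈ (PySem.Str.split? data "\n").getD [],
    PySem.Str.strip l ≠ "" → (PySem.Str.split₀ (PySem.Str.strip l)).length = 2

instance (data : String) : Decidable (Pre_count_entities data) := by
  unfold Pre_count_entities; infer_instance

def pvWitness_count_entities : String := "John B-PER\nSmith I-PER\n\nran O"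

def Spec_count_entities (data : String) (out : List (String × Int)) : Prop :=
  out = count_entities_alt data
instance (data : String) (out : List (String × Int)) : Decidable (Spec_count_entities data out) := by
  unfold Spec_count_entities; infer_instance

-- ===== CLAIM (what is proved, stated in full; the proofs are below) =====
def Claim_equal_count_entities : Prop :=
  ∀ (data : String), Dom_count_entities data → Pre_count_entities data →
    Spec_count_entities data (count_entities data)

-- ===== LEMMAS AND PROOFS =====

-- one step: flushing A's state then doing B's step equals doing A's step then flushing
lemma pvStep_comm (st : PySem.Dict String Int × Option String) (l : String)
    (hl : PySem.Str.strip l ≠ "" → (PySem.Str.split₀ (PySem.Str.strip l)).length = 2) :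
    pvFlushA (pvStepA st l) = pvStepB (pvFlushA st) l := by
  by_cases hs : PySem.Str.strip l = ""
  · simp [pvStepA, pvStepB, hs]
  · obtain ⟨w, t, ht⟩ := List.length_eq_two.mp (hl hs)
    by_cases hb : PySem.Str.startswith t "B-"
    · simp at hb
      simp [pvStepA, pvStepB, hs, ht, hb, pvFlushA]
    · by_cases hi : PySem.Str.startswith t "I-" <;>
      · simp at hb hi
        simp [pvStepA, pvStepB, hs, ht, hb, hi, pvFlushA]

lemma pvFold_comm (lines : List String)
    (h : ∀ l ∈ lines, PySem.Str.strip l ≠ "" → (PySem.Str.split₀ (PySem.Str.strip l)).length = 2) :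
    ∀ st, pvFlushA (lines.foldl pvStepA st) = lines.foldl pvStepB (pvFlushA st) := by
  induction lines with
  | nil => intro st; rfl
  | cons l ls ih =>
    intro st
    simp only [List.foldl_cons]
    rw [← pvStep_comm st l (h l (List.mem_cons_self))]
    exact ih (fun x hx => h x (List.mem_cons_of_mem l hx)) _

-- ===== VERDICT (by name: the statement is the Claim_ definition above) =====
theorem count_entities_spec : Claim_equal_count_entities := by
  intro data _ hpre
  unfold Spec_count_entities count_entities count_entities_alt
  rw [pvFold_comm _ hpre]
  rfl
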